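-- pv_equiv track=rewrite | github.com/ishita1864/polygon-generator | poly.py | find_ext
-- ===== SOURCE A (Python) =====
-- def find_ext(arr):
--     min_x = arr[0][0]
--     min_coord = arr[0]
--     max_x = arr[0][0]
--     max_coord = arr[0]
--     for coord in arr:
--         if coord[0] < min_x:
--             min_x = coord[0]
--             min_coord = coord
--         elif coord[0] > max_x:
--             max_x = coord[0]
--             max_coord = coord
--     ext_arr = [min_coord, max_coord]
--     return ext_arr
-- ===== SOURCE B (Python) =====
-- def find_ext(arr):
--     def ext(a):
--         if len(a) <= 1:
--             return a[0], a[0]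
--         mid = len(a) // 2
--         lmn, lmx = ext(a[:mid])
--         rmn, rmx = ext(a[mid:])
--         return (lmn if lmn[0] <= rmn[0] else rmn,
--                 lmx if lmx[0] >= rmx[0] else rmx)
--     mn, mx = ext(arr)
--     return [mn, mx]
-- ===== Notes on version B (the rewrite author's own statement) =====
-- stated objective: alternative
-- what changed: Replaces A's single linear accumulator loop with a divide-and-conquer recursion that halves the list, computes (min,max) of each half, and merges with left-biased combines, which preserves A's first-occurrence tie-breaking.
import Mathlib
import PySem

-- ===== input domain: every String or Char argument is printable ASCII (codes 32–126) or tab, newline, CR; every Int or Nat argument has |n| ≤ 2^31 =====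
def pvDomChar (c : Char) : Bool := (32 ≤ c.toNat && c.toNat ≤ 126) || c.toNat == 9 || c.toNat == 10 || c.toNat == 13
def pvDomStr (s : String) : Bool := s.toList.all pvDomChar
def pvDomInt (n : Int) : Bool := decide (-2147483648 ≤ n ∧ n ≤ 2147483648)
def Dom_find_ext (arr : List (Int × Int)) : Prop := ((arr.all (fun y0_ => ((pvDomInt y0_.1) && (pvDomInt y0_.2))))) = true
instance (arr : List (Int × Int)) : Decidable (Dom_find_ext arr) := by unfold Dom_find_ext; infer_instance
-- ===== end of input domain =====

-- B replaces A's single linear accumulator loop with a divide-and-conquer recursion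
-- that halves the list and merges (min,max) pairs with left-biased combines, which
-- preserves A's first-occurrence tie-breaking; objective: alternative.

-- ===== PORT A =====
def find_ext (arr : List (Int × Int)) : List (Int × Int) :=
  match arr with
  | [] => []   -- arr[0] raises IndexError in Python; excluded by Pre_find_ext
  | a0 :: _ =>
    -- state = (min_x, min_coord, max_x, max_coord)
    let s := arr.foldl
      (fun (st : Int × (Int × Int) × Int × (Int × Int)) coord =>
        if coord.1 < st.1 then (coord.1, coord, st.2.2.1, st.2.2.2)
        else if coord.1 > st.2.2.1 then (st.1, st.2.1, coord.1, coord)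
        else st)
      (a0.1, a0, a0.1, a0)
    [s.2.1, s.2.2.2]

-- ===== PORT B =====
-- Python's a[:mid] / a[mid:] with 0 ≤ mid ≤ len are List.take / List.drop.
def extRec (a : List (Int × Int)) : (Int × Int) × (Int × Int) :=
  if a.length ≤ 1 then
    match a with
    | [] => ((0, 0), (0, 0))   -- a[0] raises IndexError in Python; excluded by Pre_find_ext
    | x :: _ => (x, x)
  else
    let mid := a.length / 2
    let l := extRec (a.take mid)
    let r := extRec (a.drop mid)
    ((if l.1.1 ≤ r.1.1 then l.1 else r.1),
     (if l.2.1 ≥ r.2.1 then l.2 else r.2))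
termination_by a.length
decreasing_by
  · simp only [List.length_take]; omega
  · simp only [List.length_drop]; omega

def find_ext_alt (arr : List (Int × Int)) : List (Int × Int) :=
  let e := extRec arr
  [e.1, e.2]

-- ===== PRECONDITION & SPEC =====
-- A indexes arr[0], so it raises IndexError on the empty list (B's recursion base does too).
def Pre_find_ext (arr : List (Int × Int)) : Prop := arr ≠ []
instance (arr : List (Int × Int)) : Decidable (Pre_find_ext arr) := by unfold Pre_find_ext; infer_instance
def pvWitness_find_ext : (List (Int × Int)) := [(3, 1), (0, 2), (5, 4)]

def Spec_find_ext (arr : List (Int × Int)) (out : List (Int × Int)) : Prop := out = find_ext_alt arr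
instance (arr : List (Int × Int)) (out : List (Int × Int)) : Decidable (Spec_find_ext arr out) := by unfold Spec_find_ext; infer_instance

-- ===== CLAIM (what is proved, stated in full; the proofs are below) =====
def Claim_equal_find_ext : Prop := ∀ (arr : List (Int × Int)), Dom_find_ext arr → Pre_find_ext arr → Spec_find_ext arr (find_ext arr)

-- ===== LEMMAS AND PROOFS =====

-- abbreviations for the two running-extremum steps (left-biased)
def mstep (a b : Int × Int) : Int × Int := if b.1 < a.1 then b else a
def xstep (a b : Int × Int) : Int × Int := if a.1 < b.1 then b else a

-- A's coupled elif loop splits into independent running-min and running-max folds,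
-- as long as the state satisfies min_x ≤ max_x (which the initial state does).
theorem findExt_loop_split (t : List (Int × Int)) (mc Mc : Int × Int)
    (h : mc.1 ≤ Mc.1) :
    t.foldl
      (fun (st : Int × (Int × Int) × Int × (Int × Int)) coord =>
        if coord.1 < st.1 then (coord.1, coord, st.2.2.1, st.2.2.2)
        else if coord.1 > st.2.2.1 then (st.1, st.2.1, coord.1, coord)
        else st)
      (mc.1, mc, Mc.1, Mc)
    = (let m := t.foldl mstep mc
       let M := t.foldl xstep Mc
       (m.1, m, M.1, M)) := by
  induction t generalizing mc Mc with
  | nil => simp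
  | cons c t ih =>
    simp only [List.foldl_cons, mstep, xstep]
    by_cases h1 : c.1 < mc.1
    · have h2 : ¬ Mc.1 < c.1 := by omega
      simp only [if_pos h1, if_neg h2]
      exact ih c Mc (by omega)
    · by_cases h2 : Mc.1 < c.1
      · simp only [if_neg h1, if_pos h2]
        exact ih mc c (by omega)
      · simp only [if_neg h1, if_neg h2]
        exact ih mc Mc h

theorem mstep_assoc (a b c : Int × Int) : mstep (mstep a b) c = mstep a (mstep b c) := by
  simp only [mstep]; split_ifs <;> first | rfl | omega

theorem xstep_assoc (a b c : Int × Int) : xstep (xstep a b) c = xstep a (xstep b c) := by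
  simp only [xstep]; split_ifs <;> first | rfl | omega

theorem foldl_mstep_comm (t : List (Int × Int)) (a b : Int × Int) :
    t.foldl mstep (mstep a b) = mstep a (t.foldl mstep b) := by
  induction t generalizing b with
  | nil => rfl
  | cons c t ih => simp only [List.foldl_cons, mstep_assoc]; exact ih (mstep b c)

theorem foldl_xstep_comm (t : List (Int × Int)) (a b : Int × Int) :
    t.foldl xstep (xstep a b) = xstep a (t.foldl xstep b) := by
  induction t generalizing b with
  | nil => rfl
  | cons c t ih => simp only [List.foldl_cons, xstep_assoc]; exact ih (xstep b c)

-- B's divide-and-conquer computes exactly the two left-biased running folds.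
theorem extRec_eq (l : List (Int × Int)) (hne : l ≠ []) :
    extRec l = (l.tail.foldl mstep l.headI, l.tail.foldl xstep l.headI) := by
  induction hn : l.length using Nat.strong_induction_on generalizing l with
  | _ n ih =>
  rw [extRec.eq_def]
  by_cases h1 : l.length ≤ 1
  · match l, hne with
    | [x], _ => simp
  · simp only [if_neg h1]
    set mid := l.length / 2 with hmid
    have hl1 : l.take mid ≠ [] := by
      intro h; have := congrArg List.length h;
      simp only [List.length_take, List.length_nil] at this; omega
    have hl2 : l.drop mid ≠ [] := by
      intro h; have := congrArg List.length h;
      simp only [List.length_drop, List.length_nil] at this; omega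
    have e1 := ih (l.take mid).length (by simp [List.length_take]; omega) _ hl1 rfl
    have e2 := ih (l.drop mid).length (by simp [List.length_drop]; omega) _ hl2 rfl
    rw [e1, e2]
    -- decompose the two halves
    obtain ⟨h1', t1, ht1⟩ : ∃ h t, l.take mid = h :: t :=
      by cases hc : l.take mid with
         | nil => exact absurd hc hl1
         | cons a b => exact ⟨a, b, rfl⟩
    obtain ⟨h2', t2, ht2⟩ : ∃ h t, l.drop mid = h :: t :=
      by cases hc : l.drop mid with
         | nil => exact absurd hc hl2
         | cons a b => exact ⟨a, b, rfl⟩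
    have hl : l = h1' :: (t1 ++ h2' :: t2) := by
      conv_lhs => rw [← List.take_append_drop mid l]
      rw [ht1, ht2]; simp
    rw [ht1, ht2, hl]
    simp only [List.tail_cons, List.headI_cons, List.foldl_append, List.foldl_cons]
    have hm : (if (t1.foldl mstep h1').1 ≤ (t2.foldl mstep h2').1
                then t1.foldl mstep h1' else t2.foldl mstep h2')
            = mstep (t1.foldl mstep h1') (t2.foldl mstep h2') := by
      simp only [mstep]; split_ifs <;> first | rfl | omega
    have hx : (if (t1.foldl xstep h1').1 ≥ (t2.foldl xstep h2').1
                then t1.foldl xstep h1' else t2.foldl xstep h2')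
            = xstep (t1.foldl xstep h1') (t2.foldl xstep h2') := by
      simp only [xstep]; split_ifs <;> first | rfl | omega
    rw [hm, hx, ← foldl_mstep_comm, ← foldl_xstep_comm]

-- ===== VERDICT (by name: the statement is the Claim_ definition above) =====
theorem find_ext_spec : Claim_equal_find_ext := by
  intro arr _ hpre
  unfold Spec_find_ext find_ext find_ext_alt
  match arr with
  | [] => exact absurd rfl hpre
  | a0 :: t =>
    rw [extRec_eq _ (by simp)]
    simp only [List.foldl_cons, List.tail_cons, List.headI_cons, if_neg (lt_irrefl a0.1)]
    rw [findExt_loop_split t a0 a0 le_rfl]
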